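-- pv_equiv track=rewrite | github.com/janripke/harc | snippets/loader.py | count
-- ===== SOURCE A (Python) =====
-- def count(s, delimiters=list()):
--     result = dict()
--     for char in s:
--         if char in delimiters:
--             if char in result.keys():
--                 result[char] = result[char] + 1
--             else:
--                 result[char] = 1
--     return result
-- ===== SOURCE B (Python) =====
-- def count(s, delimiters=list()):
--     # dedup-then-scan: distinct chars in first-occurrence order, then one s.count scan per kept char
--     return {c: s.count(c) for c in dict.fromkeys(s) if c in delimiters}
-- ===== Notes on version B (the rewrite author's own statement) =====
-- stated objective: faster
-- what changed: A makes one selective Python-level pass over s accumulating a count dict only for delimiter chars; B first dedups the distinct characters in first-occurrence order (dict.fromkeys), filters them by delimiters, and counts each kept character with a separate C-level s.count scan.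
import Mathlib
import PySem

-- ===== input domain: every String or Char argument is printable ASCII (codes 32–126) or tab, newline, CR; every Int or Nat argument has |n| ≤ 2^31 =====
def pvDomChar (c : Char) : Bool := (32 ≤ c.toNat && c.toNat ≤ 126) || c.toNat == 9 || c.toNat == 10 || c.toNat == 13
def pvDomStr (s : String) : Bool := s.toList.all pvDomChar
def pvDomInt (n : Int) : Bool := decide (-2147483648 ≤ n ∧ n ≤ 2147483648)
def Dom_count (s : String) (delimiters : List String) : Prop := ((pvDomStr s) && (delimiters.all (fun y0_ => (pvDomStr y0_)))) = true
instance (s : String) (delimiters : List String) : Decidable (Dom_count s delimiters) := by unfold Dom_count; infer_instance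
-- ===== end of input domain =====

-- B replaces A's single selective counting pass with dedup-then-scan: distinct chars of s
-- in first-occurrence order, filtered by delimiters, each counted by its own s.count scan.


-- ===== PORT A =====
-- 'for char in s' iterates single-character strings
def count (s : String) (delimiters : List String) : List (String × Int) :=
  (s.toList.foldl
    (fun (result : PySem.Dict String Int) c =>
      let ch := String.ofList [c]
      if delimiters.contains ch then
        match result.get? ch with
        | some v => result.insert ch (v + 1)
        | none   => result.insert ch 1
      else result)
    PySem.Dict.empty).items

-- ===== PORT B =====
-- dict.fromkeys(s) = first-occurrence dedup; the comprehension's keys are distinct, so the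
-- resulting dict's items are exactly this list of pairs.
def count_alt (s : String) (delimiters : List String) : List (String × Int) :=
  let cs := s.toList.map (fun c => String.ofList [c])
  ((PySem.List.dedup cs).filter (fun c => delimiters.contains c)).map
    (fun c => (c, ((PySem.List.count cs c : Nat) : Int)))

-- ===== PRECONDITION & SPEC =====
def Spec_count (s : String) (delimiters : List String) (out : List (String × Int)) : Prop := out = count_alt s delimiters
instance (s : String) (delimiters : List String) (out : List (String × Int)) : Decidable (Spec_count s delimiters out) := by unfold Spec_count; infer_instance

-- ===== CLAIM (what is proved, stated in full; the proofs are below) =====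
def Claim_equal_count : Prop := ∀ (s : String) (delimiters : List String), Dom_count s delimiters → Spec_count s delimiters (count s delimiters)

-- ===== LEMMAS AND PROOFS =====

-- set(filter) = filter(set): first-occurrence dedup commutes with a filter
lemma ofList_filter (p : String → Bool) (l : List String) :
    PySem.Set.ofList (l.filter p) = (PySem.Set.ofList l).filter p := by
  induction l with
  | nil => rfl
  | cons x xs ih =>
    cases hp : p x with
    | true =>
      simp only [List.filter_cons, hp, if_pos, PySem.Set.ofList_cons, ih, PySem.Set.discard,
        List.filter_filter]
      refine congrArg _ (congrArg (fun q => List.filter q _) (funext fun a => ?_))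
      by_cases ha : a == x <;> simp [ha, Bool.and_comm]
    | false =>
      simp only [List.filter_cons, hp, Bool.false_eq_true, if_false, PySem.Set.ofList_cons, ih,
        PySem.Set.discard, List.filter_filter]
      refine congrArg (fun q => List.filter q _) (funext fun a => ?_)
      by_cases ha : a == x
      · have : a = x := by exact eq_of_beq ha
        simp [this, hp]
      · simp [ha]

-- A's loop body is the standard insert-getD-add-one counting step, applied only to delimiters
lemma stepA_eq (delimiters : List String) :
    (fun (result : PySem.Dict String Int) c =>
      let ch := String.ofList [c]
      if delimiters.contains ch then
        match result.get? ch with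
        | some v => result.insert ch (v + 1)
        | none   => result.insert ch 1
      else result)
    = (fun (d : PySem.Dict String Int) c =>
        if delimiters.contains (String.ofList [c]) then
          d.insert (String.ofList [c]) (d.getD (String.ofList [c]) 0 + 1) else d) := by
  funext d c
  simp only
  cases hc : delimiters.contains (String.ofList [c])
  · simp
  · simp only [if_pos]
    cases hg : d.get? (String.ofList [c]) with
    | none => simp [PySem.Dict.getD_eq_get?_getD, hg]
    | some v => simp [PySem.Dict.getD_eq_get?_getD, hg]

-- ===== VERDICT (by name: the statement is the Claim_ definition above) =====
theorem count_spec : Claim_equal_count := by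
  intro s delimiters _
  unfold Spec_count count count_alt
  rw [stepA_eq]
  rw [show s.toList.foldl
        (fun (d : PySem.Dict String Int) c =>
          if delimiters.contains (String.ofList [c]) then
            d.insert (String.ofList [c]) (d.getD (String.ofList [c]) 0 + 1) else d)
        PySem.Dict.empty
      = (s.toList.map (fun c => String.ofList [c])).foldl
        (fun (d : PySem.Dict String Int) ch =>
          if delimiters.contains ch then d.insert ch (d.getD ch 0 + 1) else d)
        PySem.Dict.empty from (List.foldl_map
          (f := fun c => String.ofList [c])
          (g := fun (d : PySem.Dict String Int) ch =>
            if delimiters.contains ch then d.insert ch (d.getD ch 0 + 1) else d)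
          (l := s.toList) (init := PySem.Dict.empty)).symm]
  rw [← List.foldl_filter, PySem.Dict.foldl_insert_getD_add_one_eq_counter,
    PySem.Dict.items_counter, ofList_filter]
  simp only [PySem.List.dedup_eq_ofList, PySem.List.count_eq]
  apply List.map_congr_left
  intro k hk
  have hp : delimiters.contains k = true := (List.mem_filter.mp hk).2
  rw [List.count_filter hp]
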